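-- pv_equiv track=rewrite | github.com/KIRANGONDU/snowflake-genai-ingestion | pipeline_genai.py | enforce_unique_targets
-- ===== SOURCE A (Python) =====
-- from typing import Dict, List, Optional
--
-- CANONICAL_SCHEMA = {
--     "customer_id": "string",
--     "firstname": "string",
--     "lastname": "string",
--     "gender": "string",
--     "dob": "date",
--     "email": "string",
--     "phone": "string",
--     "city": "string",
--     "country": "string",
--     "load_date": "date",
-- }
--
-- ALIASES = {
--     # ---- ID variants -> customer_id ----
--     "empid": "customer_id",
--     "emp_id": "customer_id",
--     "employee_id": "customer_id",
--     "employeeid": "customer_id",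
--     "employee-no": "customer_id",
--     "employee_no": "customer_id",
--     "employee number": "customer_id",
--     "cust_id": "customer_id",
--     "customerid": "customer_id",
--     "customer_id": "customer_id",
--     "id": "customer_id",
--
--     # ---- Name variants ----
--     "first_name": "firstname",
--     "fname": "firstname",
--     "last_name": "lastname",
--     "lname": "lastname",
--     "surname": "lastname",
--     "full_name": "name",
--     "fullname": "name",
--     "name": "name",
--
--     # ---- Gender variants ----
--     "sex": "gender",
--     "gender": "gender",
--
--     # ---- DOB variants ----
--     "dob": "dob",
--     "birthdate": "dob",
--     "date_of_birth": "dob",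
--     "dateofbirth": "dob",
--
--     # ---- Email variants ----
--     "mail": "email",
--     "email": "email",
--
--     # ---- Phone variants ----
--     "phone": "phone",
--     "mobile": "phone",
--     "mobile_no": "phone",
--     "mobile number": "phone",
--     "phone_number": "phone",
--
--     # ---- City variants ----
--     "city": "city",
--     "location": "city",
--     "place": "city",
--     "town": "city",
--
--     # ---- Country variants ----
--     "country": "country",
--
--     # ---- Load date variants ----
--     "load_date": "load_date",
--     "ingest_date": "load_date",
-- }
--
-- def enforce_unique_targets(mapping: Dict[str, Optional[str]]) -> Dict[str, Optional[str]]: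
--     """
--     If multiple source columns mapped to the same target, keep the best one:
--     - Prefer exact canonical match (src name equals target exactly).
--     - Then prefer alias matches.
--     - Others become None.
--     """
--     canonical_set = set(CANONICAL_SCHEMA.keys())
--     target_to_sources: Dict[str, List[str]] = {}
--     for src, tgt in mapping.items():
--         if tgt in canonical_set:
--             target_to_sources.setdefault(tgt, []).append(src)
--
--     for tgt, sources in target_to_sources.items():
--         if len(sources) <= 1:
--             continue
--         # Rank sources: exact match first, then alias
--         exact = [s for s in sources if s.strip().lower() == tgt]
--         alias = [s for s in sources if ALIASES.get(s.strip().lower(), None) == tgt]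
--         keep = exact[0] if exact else (alias[0] if alias else sources[0])
--         for s in sources:
--             if s != keep:
--                 mapping[s] = None
--     return mapping
-- ===== SOURCE B (Python) =====
-- from typing import Dict, List, Optional
--
-- CANONICAL_SCHEMA = {
--     "customer_id": "string",
--     "firstname": "string",
--     "lastname": "string",
--     "gender": "string",
--     "dob": "date",
--     "email": "string",
--     "phone": "string",
--     "city": "string",
--     "country": "string",
--     "load_date": "date",
-- }
--
-- ALIASES = {
--     "empid": "customer_id",
--     "emp_id": "customer_id",
--     "employee_id": "customer_id",
--     "employeeid": "customer_id",
--     "employee-no": "customer_id",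
--     "employee_no": "customer_id",
--     "employee number": "customer_id",
--     "cust_id": "customer_id",
--     "customerid": "customer_id",
--     "customer_id": "customer_id",
--     "id": "customer_id",
--     "first_name": "firstname",
--     "fname": "firstname",
--     "last_name": "lastname",
--     "lname": "lastname",
--     "surname": "lastname",
--     "full_name": "name",
--     "fullname": "name",
--     "name": "name",
--     "sex": "gender",
--     "gender": "gender",
--     "dob": "dob",
--     "birthdate": "dob",
--     "date_of_birth": "dob",
--     "dateofbirth": "dob",
--     "mail": "email",
--     "email": "email",
--     "phone": "phone",
--     "mobile": "phone",
--     "mobile_no": "phone",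
--     "mobile number": "phone",
--     "phone_number": "phone",
--     "city": "city",
--     "location": "city",
--     "place": "city",
--     "town": "city",
--     "country": "country",
--     "load_date": "load_date",
--     "ingest_date": "load_date",
-- }
--
--
-- def enforce_unique_targets(mapping: Dict[str, Optional[str]]) -> Dict[str, Optional[str]]:
--     """One pass keeps a running (priority, source) champion per canonical target
--     (2 = exact name match, 1 = alias match, 0 = other; first source wins ties),
--     then a sweep nulls every other source of a contested target (in place)."""
--     canon = set(CANONICAL_SCHEMA)
--     best: Dict[str, tuple] = {}
--     count: Dict[str, int] = {}
--     for src, tgt in mapping.items():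
--         if tgt not in canon:
--             continue
--         key = src.strip().lower()
--         prio = 2 if key == tgt else (1 if ALIASES.get(key) == tgt else 0)
--         count[tgt] = count.get(tgt, 0) + 1
--         if tgt not in best or prio > best[tgt][0]:
--             best[tgt] = (prio, src)
--     for src, tgt in list(mapping.items()):
--         if tgt in canon and count[tgt] > 1 and src != best[tgt][1]:
--             mapping[src] = None
--     return mapping
-- ===== Notes on version B (the rewrite author's own statement) =====
-- stated objective: alternative
-- what changed: Instead of building full per-target source lists and ranking each contested list with three filter passes (exact, alias, first), B keeps a running (priority, first-winner) champion and a count per canonical target in one pass, then sweeps the dict once nulling every non-champion source of a contested target.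
import Mathlib
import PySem

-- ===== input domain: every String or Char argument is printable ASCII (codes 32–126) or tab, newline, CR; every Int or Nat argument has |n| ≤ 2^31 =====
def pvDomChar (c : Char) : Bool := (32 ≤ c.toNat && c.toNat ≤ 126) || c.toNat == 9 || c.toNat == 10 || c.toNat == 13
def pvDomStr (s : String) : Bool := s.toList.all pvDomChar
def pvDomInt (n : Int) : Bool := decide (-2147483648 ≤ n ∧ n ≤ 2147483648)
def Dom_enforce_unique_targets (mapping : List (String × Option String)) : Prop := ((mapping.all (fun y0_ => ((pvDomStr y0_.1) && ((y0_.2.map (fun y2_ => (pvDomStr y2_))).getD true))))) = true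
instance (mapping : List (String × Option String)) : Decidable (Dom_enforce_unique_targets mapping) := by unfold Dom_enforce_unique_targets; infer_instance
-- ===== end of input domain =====

-- B replaces A's "collect full per-target source lists, then rank each list with three
-- filter passes" by a single pass keeping a running (priority, source) champion per target
-- plus a count, then one sweep nulling the losers (objective: alternative decomposition).
-- Both A and B mutate the dict in place in Python (same values overwritten); the theorems
-- are about the returned dict.

-- ===== PORT A =====
-- module constant CANONICAL_SCHEMA: only its key list is used (canonical_set)
def canonicalKeys : List String :=
  ["customer_id", "firstname", "lastname", "gender", "dob", "email", "phone", "city",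
   "country", "load_date"]

-- module constant ALIASES
def aliasesDict : PySem.Dict String String := PySem.Dict.mk
  [("empid", "customer_id"), ("emp_id", "customer_id"), ("employee_id", "customer_id"),
   ("employeeid", "customer_id"), ("employee-no", "customer_id"), ("employee_no", "customer_id"),
   ("employee number", "customer_id"), ("cust_id", "customer_id"), ("customerid", "customer_id"),
   ("customer_id", "customer_id"), ("id", "customer_id"),
   ("first_name", "firstname"), ("fname", "firstname"), ("last_name", "lastname"),
   ("lname", "lastname"), ("surname", "lastname"), ("full_name", "name"), ("fullname", "name"),
   ("name", "name"),
   ("sex", "gender"), ("gender", "gender"),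
   ("dob", "dob"), ("birthdate", "dob"), ("date_of_birth", "dob"), ("dateofbirth", "dob"),
   ("mail", "email"), ("email", "email"),
   ("phone", "phone"), ("mobile", "phone"), ("mobile_no", "phone"), ("mobile number", "phone"),
   ("phone_number", "phone"),
   ("city", "city"), ("location", "city"), ("place", "city"), ("town", "city"),
   ("country", "country"),
   ("load_date", "load_date"), ("ingest_date", "load_date")]

-- 'target_to_sources.setdefault(tgt, []).append(src)' = modify tgt with default [] appending src.
-- 'sources[0]' is reached only when len(sources) > 1 (never raises); rendered as headD "".
def enforce_unique_targets (mapping : List (String × Option String)) : List (String × Option String) :=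
  let canonicalSet : PySem.Set String := PySem.Set.ofList canonicalKeys
  let t2s : PySem.Dict String (List String) :=
    mapping.foldl (fun d p =>
      match p.2 with
      | some tgt =>
          if PySem.Set.contains canonicalSet tgt then d.modify tgt [] (fun l => l ++ [p.1]) else d
      | none => d) PySem.Dict.empty
  let final : PySem.Dict String (Option String) :=
    t2s.items.foldl (fun m ts =>
      if ts.2.length ≤ 1 then m
      else
        let exact := ts.2.filter (fun s => PySem.Str.lower (PySem.Str.strip s) == ts.1)
        let als := ts.2.filter (fun s =>
          aliasesDict.get? (PySem.Str.lower (PySem.Str.strip s)) == some ts.1)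
        let keep := match exact with
          | e :: _ => e
          | [] => match als with
            | a :: _ => a
            | [] => ts.2.headD ""
        ts.2.foldl (fun m s => if s ≠ keep then m.insert s none else m) m)
      (PySem.Dict.mk mapping)
  final.items

-- ===== PORT B =====
def enforce_unique_targets_alt (mapping : List (String × Option String)) : List (String × Option String) :=
  let canon : PySem.Set String := PySem.Set.ofList canonicalKeys
  let bc : PySem.Dict String (Int × String) × PySem.Dict String Int :=
    mapping.foldl (fun bc p =>
      match p.2 with
      | none => bc
      | some tgt =>
          if PySem.Set.contains canon tgt then
            let key := PySem.Str.lower (PySem.Str.strip p.1)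
            let prio : Int := if key == tgt then 2
              else if aliasesDict.get? key == some tgt then 1 else 0
            ((if !bc.1.contains tgt || prio > (bc.1.getD tgt (0, "")).1
                then bc.1.insert tgt (prio, p.1) else bc.1),
             bc.2.insert tgt (bc.2.getD tgt 0 + 1))
          else bc) (PySem.Dict.empty, PySem.Dict.empty)
  (mapping.foldl (fun m p =>
      match p.2 with
      | none => m
      | some tgt =>
          if PySem.Set.contains canon tgt && bc.2.getD tgt 0 > 1
              && p.1 != (bc.1.getD tgt (0, "")).2
          then m.insert p.1 none else m) (PySem.Dict.mk mapping)).items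

-- ===== PRECONDITION & SPEC =====
-- Pre_ excludes association lists with duplicate source keys: A's parameter is a Python
-- dict, which cannot contain a duplicate key, so such lists represent no dict input of A.
def Pre_enforce_unique_targets (mapping : List (String × Option String)) : Prop :=
  (mapping.map Prod.fst).Nodup
instance (mapping : List (String × Option String)) : Decidable (Pre_enforce_unique_targets mapping) := by
  unfold Pre_enforce_unique_targets; infer_instance

def pvWitness_enforce_unique_targets : (List (String × Option String)) :=
  [("empid", some "customer_id"), ("customer_id", some "customer_id"),
   ("Phone ", some "phone"), ("mobile", some "phone"), ("note", none)]

def Spec_enforce_unique_targets (mapping : List (String × Option String)) (out : List (String × Option String)) : Prop := out = enforce_unique_targets_alt mapping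
instance (mapping : List (String × Option String)) (out : List (String × Option String)) : Decidable (Spec_enforce_unique_targets mapping out) := by unfold Spec_enforce_unique_targets; infer_instance

-- ===== CLAIM (what is proved, stated in full; the proofs are below) =====
def Claim_equal_enforce_unique_targets : Prop := ∀ (mapping : List (String × Option String)), Dom_enforce_unique_targets mapping → Pre_enforce_unique_targets mapping → Spec_enforce_unique_targets mapping (enforce_unique_targets mapping)

-- ===== LEMMAS AND PROOFS =====

-- proof-side abbreviations (used only below the claim block)
def canonB (t : String) : Bool := PySem.Set.contains (PySem.Set.ofList canonicalKeys) t
def exactTest (t s : String) : Bool := PySem.Str.lower (PySem.Str.strip s) == t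
def aliasTest (t s : String) : Bool :=
  aliasesDict.get? (PySem.Str.lower (PySem.Str.strip s)) == some t
def prioOf (t s : String) : Int :=
  if exactTest t s then 2 else if aliasTest t s then 1 else 0
def srcsOf (mapping : List (String × Option String)) (t : String) : List String :=
  (mapping.filter (fun p => p.2 == some t)).map Prod.fst
def keepOf (t : String) (ss : List String) : String :=
  match ss.filter (exactTest t) with
  | e :: _ => e
  | [] => match ss.filter (aliasTest t) with
    | a :: _ => a
    | [] => ss.headD ""
def maxP (t : String) (ss : List String) : Int :=
  ss.foldr (fun s m => max (prioOf t s) m) (-1)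
def firstAt (t : String) (ss : List String) (m : Int) : String :=
  (ss.filter (fun s => prioOf t s == m)).headD ""
-- the per-entry "becomes None" predicate both programs implement
def killP (mapping : List (String × Option String)) (p : String × Option String) : Bool :=
  match p.2 with
  | some t => canonB t && decide (1 < (srcsOf mapping t).length)
      && p.1 != keepOf t (srcsOf mapping t)
  | none => false
def resultMap (mapping : List (String × Option String)) : List (String × Option String) :=
  mapping.map (fun p => if killP mapping p then (p.1, none) else p)

-- named step functions (definitionally equal to the ports' fold bodies)
def t2sStep (d : PySem.Dict String (List String)) (p : String × Option String) :
    PySem.Dict String (List String) :=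
  match p.2 with
  | some tgt =>
      if PySem.Set.contains (PySem.Set.ofList canonicalKeys) tgt then
        d.modify tgt [] (fun l => l ++ [p.1]) else d
  | none => d
def wipeStep (keep : String) (m : PySem.Dict String (Option String)) (s : String) :
    PySem.Dict String (Option String) :=
  if s ≠ keep then m.insert s none else m
def groupStep (m : PySem.Dict String (Option String)) (ts : String × List String) :
    PySem.Dict String (Option String) :=
  if ts.2.length ≤ 1 then m else ts.2.foldl (wipeStep (keepOf ts.1 ts.2)) m
def bStep (bc : PySem.Dict String (Int × String) × PySem.Dict String Int)
    (p : String × Option String) :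
    PySem.Dict String (Int × String) × PySem.Dict String Int :=
  match p.2 with
  | none => bc
  | some tgt =>
      if PySem.Set.contains (PySem.Set.ofList canonicalKeys) tgt then
        ((if !bc.1.contains tgt || prioOf tgt p.1 > (bc.1.getD tgt (0, "")).1
            then bc.1.insert tgt (prioOf tgt p.1, p.1) else bc.1),
         bc.2.insert tgt (bc.2.getD tgt 0 + 1))
      else bc
def bestStep (b : PySem.Dict String (Int × String)) (p : String × Option String) :
    PySem.Dict String (Int × String) :=
  match p.2 with
  | none => b
  | some tgt =>
      if canonB tgt then
        (if !b.contains tgt || prioOf tgt p.1 > (b.getD tgt (0, "")).1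
           then b.insert tgt (prioOf tgt p.1, p.1) else b)
      else b
def cntStep (c : PySem.Dict String Int) (p : String × Option String) :
    PySem.Dict String Int :=
  match p.2 with
  | none => c
  | some tgt => if canonB tgt then c.insert tgt (c.getD tgt 0 + 1) else c
def sweepStep (best : PySem.Dict String (Int × String)) (count : PySem.Dict String Int)
    (m : PySem.Dict String (Option String)) (p : String × Option String) :
    PySem.Dict String (Option String) :=
  match p.2 with
  | none => m
  | some tgt =>
      if canonB tgt && count.getD tgt 0 > 1 && p.1 != (best.getD tgt (0, "")).2
      then m.insert p.1 none else m
def condB (best : PySem.Dict String (Int × String)) (count : PySem.Dict String Int)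
    (p : String × Option String) : Bool :=
  match p.2 with
  | none => false
  | some t => canonB t && decide (count.getD t 0 > 1) && p.1 != (best.getD t (0, "")).2
def bestRun (t : String) (o : Option (Int × String)) (ss : List String) :
    Option (Int × String) :=
  ss.foldl (fun o s =>
    match o with
    | none => some (prioOf t s, s)
    | some pb => if prioOf t s > pb.1 then some (prioOf t s, s) else o) o

theorem key_unique {mapping : List (String × Option String)}
    (h : (mapping.map Prod.fst).Nodup) {p q : String × Option String}
    (hp : p ∈ mapping) (hq : q ∈ mapping) (hk : p.1 = q.1) : p = q := by
  have hnd : (PySem.Dict.mk mapping).keys.Nodup := by simpa [PySem.Dict.keys_mk] using h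
  have h1 : (PySem.Dict.mk mapping).get? p.1 = some p.2 :=
    PySem.Dict.get?_of_mem_items (d := PySem.Dict.mk mapping) (k := p.1) (v := p.2)
      (by exact hp) hnd
  have h2 : (PySem.Dict.mk mapping).get? q.1 = some q.2 :=
    PySem.Dict.get?_of_mem_items (d := PySem.Dict.mk mapping) (k := q.1) (v := q.2)
      (by exact hq) hnd
  rw [hk, h2] at h1
  obtain ⟨p1, p2⟩ := p; obtain ⟨q1, q2⟩ := q
  simp_all

theorem mem_srcsOf {k : String} {l : List (String × Option String)} {t : String} :
    k ∈ srcsOf l t ↔ ∃ p, p ∈ l ∧ p.1 = k ∧ p.2 = some t := by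
  simp only [srcsOf, List.mem_map, List.mem_filter, beq_iff_eq]
  constructor
  · rintro ⟨p, ⟨hpl, hpt⟩, rfl⟩; exact ⟨p, hpl, rfl, hpt⟩
  · rintro ⟨p, hpl, rfl, hpt⟩; exact ⟨p, ⟨hpl, hpt⟩, rfl⟩

theorem srcsOf_cons_pos {p : String × Option String} {l : List (String × Option String)}
    {t : String} (h : p.2 = some t) : srcsOf (p :: l) t = p.1 :: srcsOf l t := by
  simp [srcsOf, h]

theorem srcsOf_cons_neg {p : String × Option String} {l : List (String × Option String)}
    {t : String} (h : p.2 ≠ some t) : srcsOf (p :: l) t = srcsOf l t := by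
  simp [srcsOf, h]

-- ===== phase 1 of A: the target_to_sources dict =====
theorem canonB_mem {t : String} (h : canonB t = true) : t ∈ canonicalKeys := by
  simpa [canonB] using h

theorem canonB_not_mem {t : String} (h : ¬ canonB t = true) : t ∉ canonicalKeys := by
  simpa [canonB] using h

theorem t2s_getD (t : String) : ∀ (l : List (String × Option String))
    (d : PySem.Dict String (List String)),
    (l.foldl t2sStep d).getD t [] =
      d.getD t [] ++ (if canonB t then srcsOf l t else []) := by
  intro l
  induction l with
  | nil => intro d; simp [srcsOf]
  | cons p l ih =>
    intro d
    rw [List.foldl_cons]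
    rcases hp2 : p.2 with _ | tg
    · have hstep : t2sStep d p = d := by simp [t2sStep, hp2]
      rw [hstep, ih, srcsOf_cons_neg (by simp [hp2])]
    · by_cases hc : canonB tg
      · have hstep : t2sStep d p = d.modify tg [] (fun l => l ++ [p.1]) := by
          simp [t2sStep, hp2, canonB_mem hc]
        rw [hstep, ih, PySem.Dict.getD_modify]
        by_cases ht : t = tg
        · subst ht
          rw [srcsOf_cons_pos hp2]
          simp [hc, List.append_assoc]
        · rw [srcsOf_cons_neg (by simp [hp2]; exact fun h => ht h.symm), if_neg ht]
      · have hstep : t2sStep d p = d := by simp [t2sStep, hp2, canonB_not_mem hc]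
        rw [hstep, ih]
        by_cases ht : t = tg
        · subst ht; simp [hc]
        · rw [srcsOf_cons_neg (by simp [hp2]; exact fun h => ht h.symm)]

theorem t2s_contains (t : String) : ∀ (l : List (String × Option String))
    (d : PySem.Dict String (List String)),
    (l.foldl t2sStep d).contains t =
      (d.contains t || (canonB t && !(srcsOf l t).isEmpty)) := by
  intro l
  induction l with
  | nil => intro d; simp [srcsOf]
  | cons p l ih =>
    intro d
    rw [List.foldl_cons]
    rcases hp2 : p.2 with _ | tg
    · have hstep : t2sStep d p = d := by simp [t2sStep, hp2]
      rw [hstep, ih, srcsOf_cons_neg (by simp [hp2])]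
    · by_cases hc : canonB tg
      · have hstep : t2sStep d p = d.modify tg [] (fun l => l ++ [p.1]) := by
          simp [t2sStep, hp2, canonB_mem hc]
        rw [hstep, ih, PySem.Dict.contains_modify]
        by_cases ht : t = tg
        · subst ht; rw [srcsOf_cons_pos hp2]; simp [hc]
        · rw [srcsOf_cons_neg (by simp [hp2]; exact fun h => ht h.symm)]
          have : (t == tg) = false := by simp [ht]
          simp [this]
      · have hstep : t2sStep d p = d := by simp [t2sStep, hp2, canonB_not_mem hc]
        rw [hstep, ih]
        by_cases ht : t = tg
        · subst ht; rw [srcsOf_cons_pos hp2]; simp [hc]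
        · rw [srcsOf_cons_neg (by simp [hp2]; exact fun h => ht h.symm)]

theorem t2s_keys_nodup : ∀ (l : List (String × Option String))
    (d : PySem.Dict String (List String)), d.keys.Nodup →
    (l.foldl t2sStep d).keys.Nodup := by
  intro l
  induction l with
  | nil => intro d hd; simpa using hd
  | cons p l ih =>
    intro d hd
    rw [List.foldl_cons]
    apply ih
    rcases hp2 : p.2 with _ | tg
    · have hstep : t2sStep d p = d := by simp [t2sStep, hp2]
      rw [hstep]; exact hd
    · by_cases hc : canonB tg
      · have hstep : t2sStep d p = d.modify tg [] (fun l => l ++ [p.1]) := by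
          simp [t2sStep, hp2, canonB_mem hc]
        rw [hstep, PySem.Dict.keys_modify]
        by_cases hct : d.contains tg = true
        · rwa [PySem.Dict.keys_insert_of_contains _ _ hct]
        · rw [PySem.Dict.keys_insert_of_not_contains _ _
            (by simp only [Bool.not_eq_true] at hct; exact hct)]
          have hmem : tg ∉ d.keys := fun hm =>
            hct ((PySem.Dict.contains_iff_mem_keys d tg).mpr hm)
          simp only [List.nodup_append, List.nodup_singleton, true_and]
          constructor
          · exact hd
          · intro a ha b hb
            simp only [List.mem_singleton] at hb
            subst hb
            exact fun hab => hmem (by rwa [hab] at ha)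
      · have hstep : t2sStep d p = d := by simp [t2sStep, hp2, canonB_not_mem hc]
        rw [hstep]; exact hd

theorem t2s_get? (t : String) (l : List (String × Option String)) :
    (l.foldl t2sStep PySem.Dict.empty).get? t =
      if canonB t ∧ srcsOf l t ≠ [] then some (srcsOf l t) else none := by
  have hc := t2s_contains t l PySem.Dict.empty
  have hg := t2s_getD t l PySem.Dict.empty
  rw [PySem.Dict.contains_empty] at hc
  rw [PySem.Dict.getD_empty] at hg
  by_cases h : canonB t ∧ srcsOf l t ≠ []
  · rw [if_pos h]
    have hcon : (l.foldl t2sStep PySem.Dict.empty).contains t = true := by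
      rw [hc]; simp [h.1, h.2]
    rw [PySem.Dict.contains_eq_isSome_get?] at hcon
    obtain ⟨v, hv⟩ := Option.isSome_iff_exists.mp hcon
    have hvd := PySem.Dict.getD_of_get?_eq_some _ ([] : List String) hv
    have hveq : v = srcsOf l t := by rw [← hvd, hg, if_pos h.1]; simp
    rw [hv, hveq]
  · have hcon : (l.foldl t2sStep PySem.Dict.empty).contains t = false := by
      rw [hc]
      rcases (not_and_or.mp h) with h1 | h1
      · simp [Bool.eq_false_iff.mpr h1]
      · simp [not_not.mp h1]
    rw [if_neg h]
    exact (PySem.Dict.get?_eq_none_iff_contains _ t).mpr hcon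


-- ===== phase 2 of A: wiping the losing sources =====
theorem wipe_get? (keep k : String) : ∀ (ss : List String)
    (m : PySem.Dict String (Option String)),
    (ss.foldl (wipeStep keep) m).get? k =
      if k ∈ ss ∧ k ≠ keep then some none else m.get? k := by
  intro ss
  induction ss with
  | nil => intro m; simp
  | cons s ss ih =>
    intro m
    rw [List.foldl_cons]
    by_cases hs : s = keep
    · have hstep : wipeStep keep m s = m := by simp [wipeStep, hs]
      rw [hstep, ih]
      by_cases hk : k ∈ ss ∧ k ≠ keep
      · rw [if_pos hk, if_pos ⟨List.mem_cons_of_mem _ hk.1, hk.2⟩]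
      · rw [if_neg hk, if_neg ?_]
        rintro ⟨hmem, hne⟩
        rcases List.mem_cons.mp hmem with h1 | h1
        · exact hne (h1.trans hs)
        · exact hk ⟨h1, hne⟩
    · have hstep : wipeStep keep m s = m.insert s none := by simp [wipeStep, hs]
      rw [hstep, ih, PySem.Dict.get?_insert]
      by_cases hk : k = s
      · subst hk
        rw [if_pos (show k ∈ k :: ss ∧ k ≠ keep from ⟨List.mem_cons_self, hs⟩)]
        split
        · rfl
        · simp
      · rw [if_neg hk]
        by_cases hk2 : k ∈ ss ∧ k ≠ keep
        · rw [if_pos hk2, if_pos ⟨List.mem_cons_of_mem _ hk2.1, hk2.2⟩]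
        · rw [if_neg hk2, if_neg ?_]
          rintro ⟨hmem, hne⟩
          rcases List.mem_cons.mp hmem with h1 | h1
          · exact hk h1
          · exact hk2 ⟨h1, hne⟩

theorem wipe_keys (keep : String) : ∀ (ss : List String)
    (m : PySem.Dict String (Option String)), (∀ s ∈ ss, s ∈ m.keys) →
    (ss.foldl (wipeStep keep) m).keys = m.keys := by
  intro ss
  induction ss with
  | nil => intro m _; simp
  | cons s ss ih =>
    intro m hmem
    rw [List.foldl_cons]
    have hkeys : (wipeStep keep m s).keys = m.keys := by
      unfold wipeStep
      split
      · exact PySem.Dict.keys_insert_of_contains _ _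
          ((PySem.Dict.contains_iff_mem_keys m s).mpr (hmem s List.mem_cons_self))
      · rfl
    rw [ih (wipeStep keep m s) ?_, hkeys]
    intro s' hs'
    rw [hkeys]
    exact hmem s' (List.mem_cons_of_mem _ hs')

theorem phase2_get? (k : String) : ∀ (L : List (String × List String))
    (m : PySem.Dict String (Option String)),
    (L.foldl groupStep m).get? k =
      if ∃ ts ∈ L, 1 < ts.2.length ∧ k ∈ ts.2 ∧ k ≠ keepOf ts.1 ts.2
      then some none else m.get? k := by
  intro L
  induction L with
  | nil => intro m; simp
  | cons ts L ih =>
    intro m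
    rw [List.foldl_cons, ih]
    by_cases hlen : ts.2.length ≤ 1
    · have hstep : groupStep m ts = m := by simp [groupStep, hlen]
      rw [hstep]
      by_cases hex : ∃ ts' ∈ L, 1 < ts'.2.length ∧ k ∈ ts'.2 ∧ k ≠ keepOf ts'.1 ts'.2
      · rw [if_pos hex, if_pos ?_]
        obtain ⟨ts', h1, h2⟩ := hex
        exact ⟨ts', List.mem_cons_of_mem _ h1, h2⟩
      · rw [if_neg hex, if_neg ?_]
        rintro ⟨ts', hmem, hcond⟩
        rcases List.mem_cons.mp hmem with h1 | h1
        · subst h1; omega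
        · exact hex ⟨ts', h1, hcond⟩
    · have hstep : groupStep m ts = ts.2.foldl (wipeStep (keepOf ts.1 ts.2)) m := by
        simp [groupStep, hlen]
      rw [hstep, wipe_get?]
      by_cases hex : ∃ ts' ∈ L, 1 < ts'.2.length ∧ k ∈ ts'.2 ∧ k ≠ keepOf ts'.1 ts'.2
      · rw [if_pos hex, if_pos ?_]
        obtain ⟨ts', h1, h2⟩ := hex
        exact ⟨ts', List.mem_cons_of_mem _ h1, h2⟩
      · rw [if_neg hex]
        by_cases hk : k ∈ ts.2 ∧ k ≠ keepOf ts.1 ts.2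
        · rw [if_pos hk, if_pos ⟨ts, List.mem_cons_self, by omega, hk⟩]
        · rw [if_neg hk, if_neg ?_]
          rintro ⟨ts', hmem, hcond⟩
          rcases List.mem_cons.mp hmem with h1 | h1
          · subst h1; exact hk ⟨hcond.2.1, hcond.2.2⟩
          · exact hex ⟨ts', h1, hcond⟩

theorem phase2_keys : ∀ (L : List (String × List String))
    (m : PySem.Dict String (Option String)), (∀ ts ∈ L, ∀ s ∈ ts.2, s ∈ m.keys) →
    (L.foldl groupStep m).keys = m.keys := by
  intro L
  induction L with
  | nil => intro m _; simp
  | cons ts L ih =>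
    intro m hmem
    rw [List.foldl_cons]
    have hkeys : (groupStep m ts).keys = m.keys := by
      unfold groupStep
      split
      · rfl
      · exact wipe_keys _ _ _ (hmem ts List.mem_cons_self)
    rw [ih (groupStep m ts) ?_, hkeys]
    intro ts' hts' s hs
    rw [hkeys]
    exact hmem ts' (List.mem_cons_of_mem _ hts') s hs


-- ===== B: splitting the paired fold, counts, running best =====
theorem b_split : ∀ (l : List (String × Option String))
    (b : PySem.Dict String (Int × String)) (c : PySem.Dict String Int),
    l.foldl bStep (b, c) = (l.foldl bestStep b, l.foldl cntStep c) := by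
  intro l
  induction l with
  | nil => intro b c; rfl
  | cons p l ih =>
    intro b c
    rw [List.foldl_cons, List.foldl_cons, List.foldl_cons]
    have hstep : bStep (b, c) p = (bestStep b p, cntStep c p) := by
      rcases hp2 : p.2 with _ | tg
      · simp [bStep, bestStep, cntStep, hp2]
      · by_cases hc : canonB tg
        · simp [bStep, bestStep, cntStep, hp2, hc, canonB_mem hc]
        · simp [bStep, bestStep, cntStep, hp2, hc, canonB_not_mem hc]
    rw [hstep, ih]

theorem cnt_getD {t : String} (hc : canonB t = true) : ∀ (l : List (String × Option String))
    (c : PySem.Dict String Int),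
    (l.foldl cntStep c).getD t 0 = c.getD t 0 + ((srcsOf l t).length : Int) := by
  intro l
  induction l with
  | nil => intro c; simp [srcsOf]
  | cons p l ih =>
    intro c
    rw [List.foldl_cons]
    rcases hp2 : p.2 with _ | tg
    · have hstep : cntStep c p = c := by simp [cntStep, hp2]
      rw [hstep, ih, srcsOf_cons_neg (by simp [hp2])]
    · by_cases hctg : canonB tg
      · have hstep : cntStep c p = c.insert tg (c.getD tg 0 + 1) := by
          simp [cntStep, hp2, hctg]
        rw [hstep, ih, PySem.Dict.getD_insert]
        by_cases ht : t = tg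
        · subst ht
          rw [srcsOf_cons_pos hp2, if_pos rfl]
          simp
          ring
        · rw [if_neg ht, srcsOf_cons_neg (by simp [hp2]; exact fun h => ht h.symm)]
      · have hstep : cntStep c p = c := by simp [cntStep, hp2, hctg]
        rw [hstep, ih]
        have ht : t ≠ tg := fun h => hctg (h ▸ hc)
        rw [srcsOf_cons_neg (by simp [hp2]; exact fun h => ht h.symm)]

theorem bestRun_cons (t : String) (o : Option (Int × String)) (s : String)
    (ss : List String) :
    bestRun t o (s :: ss) = bestRun t
      (match o with
       | none => some (prioOf t s, s)
       | some pb => if prioOf t s > pb.1 then some (prioOf t s, s) else o) ss := rfl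

set_option maxHeartbeats 1000000 in
theorem bestRun_cons_some (t : String) (pb : Int × String) (s : String) (ss : List String) :
    bestRun t (some pb) (s :: ss) =
      bestRun t (if prioOf t s > pb.1 then some (prioOf t s, s) else some pb) ss := by
  rw [bestRun_cons]

set_option maxHeartbeats 1000000 in
theorem bestRun_cons_none (t : String) (s : String) (ss : List String) :
    bestRun t none (s :: ss) = bestRun t (some (prioOf t s, s)) ss := by
  rw [bestRun_cons]

set_option maxHeartbeats 1000000 in
theorem best_get? {t : String} (hc : canonB t = true) : ∀ (l : List (String × Option String))
    (b : PySem.Dict String (Int × String)),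
    (l.foldl bestStep b).get? t = bestRun t (b.get? t) (srcsOf l t) := by
  intro l
  induction l with
  | nil => intro b; simp [srcsOf, bestRun]
  | cons p l ih =>
    intro b
    rw [List.foldl_cons]
    rcases hp2 : p.2 with _ | tg
    · have hstep : bestStep b p = b := by simp [bestStep, hp2]
      rw [hstep, ih, srcsOf_cons_neg (by simp [hp2])]
    · by_cases hctg : canonB tg
      · by_cases ht : t = tg
        · subst ht
          rw [srcsOf_cons_pos hp2, ih]
          rcases hb : b.get? t with _ | pb
          · have hcon : b.contains t = false := by
              rw [PySem.Dict.contains_eq_isSome_get?, hb]; rfl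
            have hstep : bestStep b p = b.insert t (prioOf t p.1, p.1) := by
              simp [bestStep, hp2, hctg, hcon]
            rw [bestRun_cons_none, hstep, PySem.Dict.get?_insert, if_pos rfl]
          · have hcon : b.contains t = true := by
              rw [PySem.Dict.contains_eq_isSome_get?, hb]; rfl
            have hgd : b.getD t (0, "") = pb := PySem.Dict.getD_of_get?_eq_some _ _ hb
            rw [bestRun_cons_some]
            by_cases hgt : prioOf t p.1 > pb.1
            · have hstep : bestStep b p = b.insert t (prioOf t p.1, p.1) := by
                simp [bestStep, hp2, hctg, hcon, hgd, hgt]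
              rw [if_pos hgt, hstep, PySem.Dict.get?_insert, if_pos rfl]
            · have hstep : bestStep b p = b := by
                simp [bestStep, hp2, hctg, hcon, hgd, hgt]
              rw [if_neg hgt, hstep, hb]
        · rw [srcsOf_cons_neg (by simp [hp2]; exact fun h => ht h.symm)]
          have hget : (bestStep b p).get? t = b.get? t := by
            unfold bestStep
            rw [hp2]
            by_cases hcon : b.contains tg = true
            · simp only [hctg, if_true]
              split
              · rw [PySem.Dict.get?_insert, if_neg ht]
              · rfl
            · simp only [hctg, if_true]
              split
              · rw [PySem.Dict.get?_insert, if_neg ht]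
              · rfl
          rw [ih, hget]
      · have hstep : bestStep b p = b := by simp [bestStep, hp2, hctg]
        have ht : t ≠ tg := fun h => hctg (h ▸ hc)
        rw [hstep, ih, srcsOf_cons_neg (by simp [hp2]; exact fun h => ht h.symm)]

-- ===== priorities, maxima, and the keep rule =====
theorem prioOf_cases (t s : String) : prioOf t s = 0 ∨ prioOf t s = 1 ∨ prioOf t s = 2 := by
  unfold prioOf; split_ifs <;> simp

theorem prioOf_nonneg (t s : String) : 0 ≤ prioOf t s := by
  rcases prioOf_cases t s with h | h | h <;> omega

theorem prioOf_eq_two_iff (t s : String) : prioOf t s = 2 ↔ exactTest t s = true := by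
  unfold prioOf; split_ifs with h1 h2 <;> simp_all

theorem prioOf_eq_one_iff (t s : String) :
    prioOf t s = 1 ↔ (exactTest t s = false ∧ aliasTest t s = true) := by
  unfold prioOf; split_ifs with h1 h2 <;> simp_all

theorem maxP_cons (t s : String) (ss : List String) :
    maxP t (s :: ss) = max (prioOf t s) (maxP t ss) := rfl

theorem le_maxP {t s : String} {ss : List String} (hs : s ∈ ss) :
    prioOf t s ≤ maxP t ss := by
  induction ss with
  | nil => cases hs
  | cons x ss ih =>
    rw [maxP_cons]
    rcases List.mem_cons.mp hs with h | h
    · subst h; exact le_max_left _ _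
    · exact le_trans (ih h) (le_max_right _ _)

theorem maxP_attained {t : String} {ss : List String} (h : ss ≠ []) :
    ∃ s ∈ ss, prioOf t s = maxP t ss := by
  induction ss with
  | nil => exact absurd rfl h
  | cons x ss ih =>
    rcases eq_or_ne ss [] with hss | hss
    · subst hss
      refine ⟨x, List.mem_cons_self, ?_⟩
      have hm : maxP t [] = -1 := rfl
      rw [maxP_cons, hm]
      exact (max_eq_left (by have := prioOf_nonneg t x; omega)).symm
    · obtain ⟨s, hsmem, hsmax⟩ := ih hss
      rw [maxP_cons]
      rcases le_total (maxP t ss) (prioOf t x) with hle | hle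
      · exact ⟨x, List.mem_cons_self, (max_eq_left hle).symm⟩
      · exact ⟨s, List.mem_cons_of_mem _ hsmem, by rw [max_eq_right hle, hsmax]⟩

theorem firstAt_cons_pos {t s : String} {m : Int} (h : prioOf t s = m) (ss : List String) :
    firstAt t (s :: ss) m = s := by
  simp [firstAt, h]

theorem firstAt_cons_neg {t s : String} {m : Int} (h : prioOf t s ≠ m) (ss : List String) :
    firstAt t (s :: ss) m = firstAt t ss m := by
  simp [firstAt, h]

set_option maxHeartbeats 1000000 in
theorem bestRun_some (t : String) : ∀ (ss : List String) (pb : Int × String),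
    0 ≤ pb.1 → bestRun t (some pb) ss =
      some (if pb.1 < maxP t ss then (maxP t ss, firstAt t ss (maxP t ss)) else pb) := by
  intro ss
  induction ss with
  | nil =>
    intro pb hpb
    have hm : maxP t [] = -1 := rfl
    rw [hm, if_neg (by omega)]
    rfl
  | cons s ss ih =>
    intro pb hpb
    have h1 : firstAt t (s :: ss) (prioOf t s) = s := firstAt_cons_pos rfl ss
    have h2 : ∀ m, prioOf t s ≠ m → firstAt t (s :: ss) m = firstAt t ss m :=
      fun m h => firstAt_cons_neg h ss
    have hnn := prioOf_nonneg t s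
    rw [bestRun_cons_some, maxP_cons]
    generalize hps : prioOf t s = P at h1 h2 hnn ⊢
    by_cases hgt : P > pb.1
    · rw [if_pos hgt, ih (P, s) hnn]
      have hcond : pb.1 < max P (maxP t ss) := lt_of_lt_of_le hgt (le_max_left _ _)
      rw [if_pos hcond]
      by_cases hlt : P < maxP t ss
      · rw [if_pos hlt, max_eq_right (le_of_lt hlt), h2 _ (ne_of_lt hlt)]
      · rw [if_neg hlt]
        have hmax : max P (maxP t ss) = P := max_eq_left (by omega)
        rw [hmax, h1]
    · rw [if_neg hgt, ih pb hpb]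
      by_cases hlt2 : pb.1 < maxP t ss
      · rw [if_pos hlt2, if_pos (lt_of_lt_of_le hlt2 (le_max_right _ _))]
        have hmax : max P (maxP t ss) = maxP t ss := max_eq_right (by omega)
        rw [hmax, h2 _ (by omega)]
      · rw [if_neg hlt2, if_neg (by rw [not_lt, max_le_iff]; constructor <;> omega)]

set_option maxHeartbeats 1000000 in
theorem bestRun_none {t : String} {ss : List String} (h : ss ≠ []) :
    bestRun t none ss = some (maxP t ss, firstAt t ss (maxP t ss)) := by
  rcases ss with _ | ⟨s, ss⟩
  · exact absurd rfl h
  · have h1 : firstAt t (s :: ss) (prioOf t s) = s := firstAt_cons_pos rfl ss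
    have h2 : ∀ m, prioOf t s ≠ m → firstAt t (s :: ss) m = firstAt t ss m :=
      fun m h => firstAt_cons_neg h ss
    have hnn := prioOf_nonneg t s
    rw [bestRun_cons_none, maxP_cons]
    generalize hps : prioOf t s = P at h1 h2 hnn ⊢
    rw [bestRun_some t ss (P, s) hnn]
    by_cases hlt : P < maxP t ss
    · rw [if_pos hlt, max_eq_right (le_of_lt hlt), h2 _ (ne_of_lt hlt)]
    · rw [if_neg hlt]
      have hmax : max P (maxP t ss) = P := max_eq_left (by omega)
      rw [hmax, h1]

set_option maxHeartbeats 1000000 in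
theorem keepOf_eq_firstAt {t : String} {ss : List String} (h : ss ≠ []) :
    keepOf t ss = firstAt t ss (maxP t ss) := by
  obtain ⟨s0, hs0mem, hs0⟩ := maxP_attained (t := t) h
  have hM : maxP t ss = 0 ∨ maxP t ss = 1 ∨ maxP t ss = 2 := by
    rcases prioOf_cases t s0 with h1 | h1 | h1 <;> rw [← hs0] <;> omega
  rcases hM with hM | hM | hM
  · -- all priorities are 0: no exact, no alias, keep = head
    have hall : ∀ s ∈ ss, prioOf t s = 0 := by
      intro s hs
      have := le_maxP (t := t) hs
      have := prioOf_nonneg t s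
      omega
    have hex : ss.filter (exactTest t) = [] := by
      rw [List.filter_eq_nil_iff]
      intro s hs
      have h0 := hall s hs
      intro hexs
      rw [(prioOf_eq_two_iff t s).mpr hexs] at h0
      omega
    have hal : ss.filter (aliasTest t) = [] := by
      rw [List.filter_eq_nil_iff]
      intro s hs
      have h0 := hall s hs
      intro hals
      cases hexs : exactTest t s
      · rw [(prioOf_eq_one_iff t s).mpr ⟨hexs, hals⟩] at h0; omega
      · rw [(prioOf_eq_two_iff t s).mpr hexs] at h0; omega
    have hfa : ss.filter (fun s => prioOf t s == maxP t ss) = ss := by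
      rw [List.filter_eq_self]
      intro s hs
      simp [hall s hs, hM]
    unfold keepOf firstAt
    rw [hex, hal, hfa]
  · -- no exact match; first alias wins
    have hno2 : ∀ s ∈ ss, exactTest t s = false := by
      intro s hs
      have hle := le_maxP (t := t) hs
      rcases prioOf_cases t s with h1 | h1 | h1
      · unfold prioOf at h1; split_ifs at h1 with he <;> simp_all
      · unfold prioOf at h1; split_ifs at h1 with he <;> simp_all
      · rw [hM] at hle; omega
    have hex : ss.filter (exactTest t) = [] := by
      rw [List.filter_eq_nil_iff]
      intro s hs
      simp [hno2 s hs]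
    have hal : ss.filter (aliasTest t) = ss.filter (fun s => prioOf t s == maxP t ss) := by
      apply List.filter_congr
      intro s hs
      rw [hM]
      unfold prioOf
      rw [hno2 s hs]
      cases aliasTest t s <;> simp
    obtain ⟨x, l, hxl⟩ : ∃ x l, ss.filter (fun s => prioOf t s == maxP t ss) = x :: l := by
      rcases hfl : ss.filter (fun s => prioOf t s == maxP t ss) with _ | ⟨x, l⟩
      · exfalso
        have : s0 ∈ ss.filter (fun s => prioOf t s == maxP t ss) := by
          rw [List.mem_filter]
          exact ⟨hs0mem, by simp [hs0]⟩
        rw [hfl] at this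
        cases this
      · exact ⟨x, l, rfl⟩
    unfold keepOf firstAt
    rw [hex, hal, hxl]
    rfl
  · -- an exact match exists and wins
    have hal : ss.filter (exactTest t) = ss.filter (fun s => prioOf t s == maxP t ss) := by
      apply List.filter_congr
      intro s hs
      rw [hM]
      cases hexs : exactTest t s
      · have hne : prioOf t s ≠ 2 := fun hp => by
          have := (prioOf_eq_two_iff t s).mp hp
          rw [hexs] at this
          cases this
        simp [hne]
      · simp [(prioOf_eq_two_iff t s).mpr hexs]
    obtain ⟨x, l, hxl⟩ : ∃ x l, ss.filter (fun s => prioOf t s == maxP t ss) = x :: l := by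
      rcases hfl : ss.filter (fun s => prioOf t s == maxP t ss) with _ | ⟨x, l⟩
      · exfalso
        have : s0 ∈ ss.filter (fun s => prioOf t s == maxP t ss) := by
          rw [List.mem_filter]
          exact ⟨hs0mem, by simp [hs0]⟩
        rw [hfl] at this
        cases this
      · exact ⟨x, l, rfl⟩
    unfold keepOf firstAt
    rw [hal, hxl]
    rfl


-- ===== B: the nulling sweep =====
theorem killP_none {mapping : List (String × Option String)} {p : String × Option String}
    (h : p.2 = none) : killP mapping p = false := by
  obtain ⟨a, b⟩ := p
  simp only at h
  subst h
  rfl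

theorem killP_some {mapping : List (String × Option String)} {p : String × Option String}
    {t : String} (h : p.2 = some t) :
    killP mapping p = (canonB t && decide (1 < (srcsOf mapping t).length)
      && p.1 != keepOf t (srcsOf mapping t)) := by
  obtain ⟨a, b⟩ := p
  simp only at h
  subst h
  rfl

theorem condB_none {best : PySem.Dict String (Int × String)} {count : PySem.Dict String Int}
    {p : String × Option String} (h : p.2 = none) : condB best count p = false := by
  obtain ⟨a, b⟩ := p
  simp only at h
  subst h
  rfl

theorem condB_some {best : PySem.Dict String (Int × String)} {count : PySem.Dict String Int}
    {p : String × Option String} {t : String} (h : p.2 = some t) :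
    condB best count p =
      (canonB t && decide (count.getD t 0 > 1) && p.1 != (best.getD t (0, "")).2) := by
  obtain ⟨a, b⟩ := p
  simp only at h
  subst h
  rfl

theorem sweepStep_eq (best : PySem.Dict String (Int × String)) (count : PySem.Dict String Int)
    (m : PySem.Dict String (Option String)) (p : String × Option String) :
    sweepStep best count m p =
      if condB best count p then m.insert p.1 none else m := by
  rcases hp2 : p.2 with _ | tg
  · rw [condB_none hp2]
    obtain ⟨a, b⟩ := p
    simp only at hp2
    subst hp2
    rfl
  · rw [condB_some hp2]
    obtain ⟨a, b⟩ := p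
    simp only at hp2
    subst hp2
    rfl

theorem sweep_get? (best : PySem.Dict String (Int × String)) (count : PySem.Dict String Int)
    (k : String) : ∀ (l : List (String × Option String))
    (m : PySem.Dict String (Option String)),
    (l.foldl (sweepStep best count) m).get? k =
      if ∃ p ∈ l, p.1 = k ∧ condB best count p = true then some none else m.get? k := by
  intro l
  induction l with
  | nil => intro m; simp
  | cons p l ih =>
    intro m
    rw [List.foldl_cons, ih, sweepStep_eq]
    by_cases hcb : condB best count p = true
    · rw [if_pos hcb, PySem.Dict.get?_insert]
      by_cases hex : ∃ q ∈ l, q.1 = k ∧ condB best count q = true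
      · rw [if_pos hex, if_pos ?_]
        obtain ⟨q, h1, h2⟩ := hex
        exact ⟨q, List.mem_cons_of_mem _ h1, h2⟩
      · rw [if_neg hex]
        by_cases hk : k = p.1
        · rw [if_pos hk, if_pos ⟨p, List.mem_cons_self, hk.symm, hcb⟩]
        · rw [if_neg hk, if_neg ?_]
          rintro ⟨q, hq, hq1, hq2⟩
          rcases List.mem_cons.mp hq with h1 | h1
          · subst h1; exact hk hq1.symm
          · exact hex ⟨q, h1, hq1, hq2⟩
    · rw [if_neg hcb]
      by_cases hex : ∃ q ∈ l, q.1 = k ∧ condB best count q = true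
      · rw [if_pos hex, if_pos ?_]
        obtain ⟨q, h1, h2⟩ := hex
        exact ⟨q, List.mem_cons_of_mem _ h1, h2⟩
      · rw [if_neg hex, if_neg ?_]
        rintro ⟨q, hq, hq1, hq2⟩
        rcases List.mem_cons.mp hq with h1 | h1
        · subst h1; exact hcb hq2
        · exact hex ⟨q, h1, hq1, hq2⟩

theorem sweep_keys (best : PySem.Dict String (Int × String)) (count : PySem.Dict String Int) :
    ∀ (l : List (String × Option String)) (m : PySem.Dict String (Option String)),
    (∀ p ∈ l, p.1 ∈ m.keys) →
    (l.foldl (sweepStep best count) m).keys = m.keys := by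
  intro l
  induction l with
  | nil => intro m _; simp
  | cons p l ih =>
    intro m hmem
    rw [List.foldl_cons]
    have hkeys : (sweepStep best count m p).keys = m.keys := by
      rw [sweepStep_eq]
      split
      · exact PySem.Dict.keys_insert_of_contains _ _
          ((PySem.Dict.contains_iff_mem_keys m p.1).mpr (hmem p List.mem_cons_self))
      · rfl
    rw [ih (sweepStep best count m p) ?_, hkeys]
    intro q hq
    rw [hkeys]
    exact hmem q (List.mem_cons_of_mem _ hq)

-- ===== the two characterizations =====
set_option maxHeartbeats 1000000 in
theorem A_char (mapping : List (String × Option String))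
    (hpre : (mapping.map Prod.fst).Nodup) :
    enforce_unique_targets mapping = resultMap mapping := by
  have e1 : enforce_unique_targets mapping =
      ((mapping.foldl t2sStep PySem.Dict.empty).items.foldl groupStep
        (PySem.Dict.mk mapping)).items := rfl
  rw [e1]
  have hnd0 : (PySem.Dict.mk mapping).keys.Nodup := by
    simpa [PySem.Dict.keys_mk] using hpre
  have hndt : (mapping.foldl t2sStep PySem.Dict.empty).keys.Nodup :=
    t2s_keys_nodup mapping _ (by simp)
  have hitems : ∀ ts ∈ (mapping.foldl t2sStep PySem.Dict.empty).items,
      canonB ts.1 = true ∧ ts.2 = srcsOf mapping ts.1 := by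
    intro ts hts
    have hget : (mapping.foldl t2sStep PySem.Dict.empty).get? ts.1 = some ts.2 :=
      PySem.Dict.get?_of_mem_items (d := mapping.foldl t2sStep PySem.Dict.empty)
        (k := ts.1) (v := ts.2) (by exact hts) hndt
    rw [t2s_get?] at hget
    by_cases h : canonB ts.1 ∧ srcsOf mapping ts.1 ≠ []
    · rw [if_pos h] at hget
      exact ⟨h.1, (Option.some.inj hget).symm⟩
    · rw [if_neg h] at hget; cases hget
  have hsub : ∀ ts ∈ (mapping.foldl t2sStep PySem.Dict.empty).items,
      ∀ s ∈ ts.2, s ∈ (PySem.Dict.mk mapping).keys := by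
    intro ts hts s hs
    rw [(hitems ts hts).2] at hs
    obtain ⟨p, hp, hp1, _⟩ := mem_srcsOf.mp hs
    rw [PySem.Dict.keys_mk]
    exact List.mem_map.mpr ⟨p, hp, hp1⟩
  have hkeys : ((mapping.foldl t2sStep PySem.Dict.empty).items.foldl groupStep
      (PySem.Dict.mk mapping)).keys = (PySem.Dict.mk mapping).keys :=
    phase2_keys _ _ hsub
  have hndF : ((mapping.foldl t2sStep PySem.Dict.empty).items.foldl groupStep
      (PySem.Dict.mk mapping)).keys.Nodup := by rw [hkeys]; exact hnd0
  rw [PySem.Dict.items_eq_map_keys _ hndF none, hkeys, PySem.Dict.keys_mk,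
    List.map_map]
  unfold resultMap
  apply List.map_congr_left
  intro p hp
  have hbase : (PySem.Dict.mk mapping).get? p.1 = some p.2 :=
    PySem.Dict.get?_of_mem_items (d := PySem.Dict.mk mapping)
      (k := p.1) (v := p.2) (by exact hp) hnd0
  have hget := phase2_get? p.1 (mapping.foldl t2sStep PySem.Dict.empty).items
    (PySem.Dict.mk mapping)
  have hiff : (∃ ts ∈ (mapping.foldl t2sStep PySem.Dict.empty).items,
      1 < ts.2.length ∧ p.1 ∈ ts.2 ∧ p.1 ≠ keepOf ts.1 ts.2) ↔ killP mapping p = true := by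
    constructor
    · rintro ⟨ts, hts, hlen, hmem, hne⟩
      obtain ⟨hc, hss⟩ := hitems ts hts
      rw [hss] at hlen hmem hne
      obtain ⟨q, hq, hq1, hq2⟩ := mem_srcsOf.mp hmem
      have hqp : q = p := key_unique hpre hq hp hq1
      subst hqp
      rw [killP_some hq2]
      simp [hc, hlen, bne_iff_ne, hne]
    · intro hkill
      rcases hp2 : p.2 with _ | t
      · rw [killP_none hp2] at hkill; cases hkill
      · rw [killP_some hp2] at hkill
        have hkill' := hkill
        simp only [Bool.and_eq_true] at hkill'
        obtain ⟨⟨hc, hlen⟩, h3⟩ := hkill'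
        have hlen' : 1 < (srcsOf mapping t).length := of_decide_eq_true hlen
        have hne0 : srcsOf mapping t ≠ [] := by
          intro hnil; rw [hnil] at hlen'; simp at hlen'
        have hget2 : (mapping.foldl t2sStep PySem.Dict.empty).get? t =
            some (srcsOf mapping t) := by
          rw [t2s_get?, if_pos ⟨hc, hne0⟩]
        have hmemi : (t, srcsOf mapping t) ∈ (mapping.foldl t2sStep PySem.Dict.empty).items :=
          (PySem.Dict.get?_eq_some_iff_mem_items _ t _ hndt).mp hget2
        refine ⟨(t, srcsOf mapping t), hmemi, hlen', ?_, ?_⟩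
        · exact mem_srcsOf.mpr ⟨p, hp, rfl, hp2⟩
        · exact bne_iff_ne.mp h3
  by_cases hk : killP mapping p = true
  · rw [Function.comp_apply]
    rw [if_pos hk]
    have hres : ((mapping.foldl t2sStep PySem.Dict.empty).items.foldl groupStep
        (PySem.Dict.mk mapping)).get? p.1 = some none := by
      rw [hget, if_pos (hiff.mpr hk)]
    rw [PySem.Dict.getD_eq_get?_getD, hres]
    rfl
  · rw [Function.comp_apply]
    rw [if_neg hk]
    have hres : ((mapping.foldl t2sStep PySem.Dict.empty).items.foldl groupStep
        (PySem.Dict.mk mapping)).get? p.1 = some p.2 := by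
      rw [hget, if_neg (fun hx => hk (hiff.mp hx)), hbase]
    rw [PySem.Dict.getD_eq_get?_getD, hres]
    rfl

set_option maxHeartbeats 1000000 in
theorem B_char (mapping : List (String × Option String))
    (hpre : (mapping.map Prod.fst).Nodup) :
    enforce_unique_targets_alt mapping = resultMap mapping := by
  have e1 : enforce_unique_targets_alt mapping =
      (mapping.foldl
        (sweepStep (mapping.foldl bStep (PySem.Dict.empty, PySem.Dict.empty)).1
          (mapping.foldl bStep (PySem.Dict.empty, PySem.Dict.empty)).2)
        (PySem.Dict.mk mapping)).items := rfl
  rw [e1, b_split]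
  show (mapping.foldl
      (sweepStep (mapping.foldl bestStep PySem.Dict.empty)
        (mapping.foldl cntStep PySem.Dict.empty))
      (PySem.Dict.mk mapping)).items = _
  have hnd0 : (PySem.Dict.mk mapping).keys.Nodup := by
    simpa [PySem.Dict.keys_mk] using hpre
  have hsub : ∀ p ∈ mapping, p.1 ∈ (PySem.Dict.mk mapping).keys := by
    intro p hp
    rw [PySem.Dict.keys_mk]
    exact List.mem_map.mpr ⟨p, hp, rfl⟩
  have hkeys := sweep_keys (mapping.foldl bestStep PySem.Dict.empty)
    (mapping.foldl cntStep PySem.Dict.empty) mapping (PySem.Dict.mk mapping) hsub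
  have hndF : (mapping.foldl
      (sweepStep (mapping.foldl bestStep PySem.Dict.empty)
        (mapping.foldl cntStep PySem.Dict.empty))
      (PySem.Dict.mk mapping)).keys.Nodup := by rw [hkeys]; exact hnd0
  rw [PySem.Dict.items_eq_map_keys _ hndF none, hkeys, PySem.Dict.keys_mk,
    List.map_map]
  unfold resultMap
  apply List.map_congr_left
  intro p hp
  have hbase : (PySem.Dict.mk mapping).get? p.1 = some p.2 :=
    PySem.Dict.get?_of_mem_items (d := PySem.Dict.mk mapping)
      (k := p.1) (v := p.2) (by exact hp) hnd0
  have hget := sweep_get? (mapping.foldl bestStep PySem.Dict.empty)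
    (mapping.foldl cntStep PySem.Dict.empty) p.1 mapping (PySem.Dict.mk mapping)
  have hBA : condB (mapping.foldl bestStep PySem.Dict.empty)
      (mapping.foldl cntStep PySem.Dict.empty) p = killP mapping p := by
    rcases hp2 : p.2 with _ | t
    · rw [condB_none hp2, killP_none hp2]
    · rw [condB_some hp2, killP_some hp2]
      by_cases hc : canonB t = true
      · have hcnt : (mapping.foldl cntStep PySem.Dict.empty).getD t 0 =
            ((srcsOf mapping t).length : Int) := by
          rw [cnt_getD hc mapping, PySem.Dict.getD_empty]
          simp
        have hdec : decide ((mapping.foldl cntStep PySem.Dict.empty).getD t 0 > 1) =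
            decide (1 < (srcsOf mapping t).length) := by
          rw [hcnt]
          apply decide_eq_decide.mpr
          constructor <;> intro h <;> exact_mod_cast h
        by_cases hlen : 1 < (srcsOf mapping t).length
        · have hne0 : srcsOf mapping t ≠ [] := by
            intro hnil; rw [hnil] at hlen; simp at hlen
          have hbest : (mapping.foldl bestStep PySem.Dict.empty).get? t =
              some (maxP t (srcsOf mapping t),
                firstAt t (srcsOf mapping t) (maxP t (srcsOf mapping t))) := by
            rw [best_get? hc mapping, PySem.Dict.get?_empty, bestRun_none hne0]
          have hgd : (mapping.foldl bestStep PySem.Dict.empty).getD t (0, "") =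
              (maxP t (srcsOf mapping t),
                firstAt t (srcsOf mapping t) (maxP t (srcsOf mapping t))) :=
            PySem.Dict.getD_of_get?_eq_some _ _ hbest
          rw [hdec, hgd]
          rw [show (maxP t (srcsOf mapping t),
              firstAt t (srcsOf mapping t) (maxP t (srcsOf mapping t))).2 =
              keepOf t (srcsOf mapping t) from (keepOf_eq_firstAt hne0).symm]
        · rw [hdec]
          have hd : decide (1 < (srcsOf mapping t).length) = false := by
            simp [hlen]
          simp [hd]
      · have hc' : canonB t = false := by
          cases h' : canonB t
          · rfl
          · exact absurd h' hc
        simp [hc']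
  have hiff : (∃ q ∈ mapping, q.1 = p.1 ∧ condB (mapping.foldl bestStep PySem.Dict.empty)
      (mapping.foldl cntStep PySem.Dict.empty) q = true) ↔ killP mapping p = true := by
    constructor
    · rintro ⟨q, hq, hq1, hq2⟩
      have hqp : q = p := key_unique hpre hq hp hq1
      subst hqp
      rw [← hBA]
      exact hq2
    · intro hkill
      exact ⟨p, hp, rfl, by rw [hBA]; exact hkill⟩
  by_cases hk : killP mapping p = true
  · rw [Function.comp_apply, if_pos hk]
    have hres := hget
    rw [if_pos (hiff.mpr hk)] at hres
    rw [PySem.Dict.getD_eq_get?_getD, hres]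
    rfl
  · rw [Function.comp_apply, if_neg hk]
    have hres := hget
    rw [if_neg (fun hx => hk (hiff.mp hx)), hbase] at hres
    rw [PySem.Dict.getD_eq_get?_getD, hres]
    rfl

-- ===== VERDICT (by name: the statement is the Claim_ definition above) =====
theorem enforce_unique_targets_spec : Claim_equal_enforce_unique_targets := by
  intro mapping _ hpre
  unfold Spec_enforce_unique_targets
  rw [A_char mapping hpre, B_char mapping hpre]
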